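-- pv_equiv track=rewrite | github.com/entrymissing/advent-of-code-23 | day10.py | zoom_and_enhance
-- ===== SOURCE A (Python) =====
-- paint_map = {
--     'S': ('.*.', '***', '.*.'),
--     '|': ('.*.', '.*.', '.*.'),
--     '-': ('...', '***', '...'),
--     'L': ('.*.', '.**', '...'),
--     'J': ('.*.', '**.', '...'),
--     '7': ('...', '**.', '.*.'),
--     'F': ('...', '.**', '.*.'),
-- }
--
-- def zoom_and_enhance(map, path):
--   new_map = [['.']*len(map)*3 for _ in range(len(map)*3)]
--
--   for row_idx, row in enumerate(map):
--     for col_idx, v in enumerate(row):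
--       new_row_idx = row_idx * 3
--       new_col_idx = col_idx * 3
--
--       if (col_idx, row_idx) not in path:
--         v = '.'
--       if v not in paint_map:
--         continue
--       for paint_row in range(3):
--         symbols = paint_map[v][paint_row]
--         for i, s in enumerate(symbols):
--           new_map[new_row_idx+paint_row][new_col_idx+i] = s
--
--   return new_map
-- ===== SOURCE B (Python) =====
-- paint_map = {
--     'S': ('.*.', '***', '.*.'),
--     '|': ('.*.', '.*.', '.*.'),
--     '-': ('...', '***', '...'),
--     'L': ('.*.', '.**', '...'),
--     'J': ('.*.', '**.', '...'),
--     '7': ('...', '**.', '.*.'),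
--     'F': ('...', '.**', '.*.'),
-- }
--
-- def zoom_and_enhance(map, path):
--   n = len(map)
--   out = []
--   for row_idx in range(n):
--     row = map[row_idx]
--     tops, mids, bots = [], [], []
--     for col_idx in range(n):
--       v = row[col_idx] if col_idx < len(row) else '.'
--       t, m, b = paint_map.get(v, ('...', '...', '...')) if (col_idx, row_idx) in path else ('...', '...', '...')
--       tops += t; mids += m; bots += b
--     out += [tops, mids, bots]
--   return out
-- ===== Notes on version B (the rewrite author's own statement) =====
-- stated objective: idiomatic
-- what changed: B builds the zoomed grid functionally row-block by row-block, concatenating 3x3 templates left to right, instead of preallocating a 3n x 3n grid of dots and mutating individual cells with nested index writes.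
import Mathlib
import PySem

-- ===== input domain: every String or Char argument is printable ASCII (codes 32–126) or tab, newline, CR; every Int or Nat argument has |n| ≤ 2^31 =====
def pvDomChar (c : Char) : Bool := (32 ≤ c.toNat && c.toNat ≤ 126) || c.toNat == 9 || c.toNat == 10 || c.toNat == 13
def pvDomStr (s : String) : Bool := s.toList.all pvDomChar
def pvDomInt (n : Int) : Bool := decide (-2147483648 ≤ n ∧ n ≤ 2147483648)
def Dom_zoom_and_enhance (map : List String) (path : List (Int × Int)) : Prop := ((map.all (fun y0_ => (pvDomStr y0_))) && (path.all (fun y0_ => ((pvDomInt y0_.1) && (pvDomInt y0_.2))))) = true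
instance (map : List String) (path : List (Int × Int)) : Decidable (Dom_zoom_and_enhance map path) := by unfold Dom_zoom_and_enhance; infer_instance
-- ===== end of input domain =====

-- B replaces A's preallocate-and-mutate construction (cell-by-cell index writes into a
-- 3n×3n grid of dots) by a functional one that concatenates the 3×3 templates row-block
-- by row-block (objective: idiomatic; same asymptotic cost).

-- ===== PORT A =====

-- the module constant paint_map (a dict with 7 distinct literal char keys), as a lookup function
def paintMap : Char → Option (String × String × String)
  | 'S' => some (".*.", "***", ".*.")
  | '|' => some (".*.", ".*.", ".*.")
  | '-' => some ("...", "***", "...")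
  | 'L' => some (".*.", ".**", "...")
  | 'J' => some (".*.", "**.", "...")
  | '7' => some ("...", "**.", ".*.")
  | 'F' => some ("...", ".**", ".*.")
  | _   => none

-- paint_map[v][paint_row]: tuple indexing, paint_row drawn from range(3)
def tplRow (t : String × String × String) (pr : Int) : String :=
  if pr = 0 then t.1 else if pr = 1 then t.2.1 else t.2.2

-- new_map[R][C] = s: one Python cell assignment (row R is always in range where A uses it;
-- a column C out of range raises IndexError in Python — excluded by Pre_ — and pySetD is a no-op)
def aWrite (g : List (List String)) (R C : Int) (s : String) : List (List String) :=
  PySem.List.pySetD g R (PySem.List.pySetD (PySem.List.pyGetD g R []) C s)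

-- A's 'for paint_row in range(3): symbols = …; for i, s in enumerate(symbols): …' block
def aPaint (g : List (List String)) (R C : Int) (tpl : String × String × String) :
    List (List String) :=
  (PySem.List.pyRange 0 3 1).foldl (fun g pr =>
    (PySem.List.enumerate (tplRow tpl pr).toList 0).foldl
      (fun g is => aWrite g (R + pr) (C + is.1) (Char.toString is.2)) g) g

-- body of A's inner loop (one cell: default v to '.', skip when not a paint_map key)
def aCol (path : List (Int × Int)) (ri : Int) (g : List (List String)) (cp : Int × Char) :
    List (List String) :=
  let v := if (cp.1, ri) ∈ path then cp.2 else '.'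
  match paintMap v with
  | none => g
  | some tpl => aPaint g (ri * 3) (cp.1 * 3) tpl

-- body of A's outer loop (one row of map)
def aRow (path : List (Int × Int)) (g : List (List String)) (rp : Int × String) :
    List (List String) :=
  (PySem.List.enumerate rp.2.toList 0).foldl (aCol path rp.1) g

def zoom_and_enhance (map : List String) (path : List (Int × Int)) : List (List String) :=
  let new_map := List.replicate (map.length * 3) (List.replicate (map.length * 3) ".")
  (PySem.List.enumerate map 0).foldl (aRow path) new_map

-- ===== PORT B =====

def zoom_and_enhance_alt (map : List String) (path : List (Int × Int)) : List (List String) :=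
  let n := map.length
  (List.range n).foldl (fun out row_idx =>
    let row := map.getD row_idx ""
    let tmb := (List.range n).foldl
      (fun (acc : List String × List String × List String) col_idx =>
        let v := row.toList.getD col_idx '.'
        let t := if ((col_idx : Int), (row_idx : Int)) ∈ path then
            (paintMap v).getD ("...", "...", "...") else ("...", "...", "...")
        (acc.1 ++ t.1.toList.map Char.toString,
         acc.2.1 ++ t.2.1.toList.map Char.toString,
         acc.2.2 ++ t.2.2.toList.map Char.toString))
      ([], [], [])
    out ++ [tmb.1, tmb.2.1, tmb.2.2]) []

-- ===== PRECONDITION & SPEC =====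
-- Pre_ excludes exactly the inputs on which Python A raises IndexError: a cell that gets
-- painted (its coordinates are in path and its char is a paint_map key) lying at a column
-- ≥ len(map) — possible only when a row string is longer than the number of rows — where
-- A's write new_map[...][3*col+i] is out of range.  On every other input A returns normally.
def Pre_zoom_and_enhance (map : List String) (path : List (Int × Int)) : Prop :=
  ∀ r, r < map.length → ∀ c, c < (map.getD r "").toList.length →
    ((c : Int), (r : Int)) ∈ path →
    (paintMap ((map.getD r "").toList.getD c '.')).isSome = true → c < map.length

instance (map : List String) (path : List (Int × Int)) : Decidable (Pre_zoom_and_enhance map path) := by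
  unfold Pre_zoom_and_enhance; infer_instance

def pvWitness_zoom_and_enhance : List String × (List (Int × Int)) :=
  (["S-", "|."], [(0, 0), (1, 0), (0, 1)])

def Spec_zoom_and_enhance (map : List String) (path : List (Int × Int)) (out : List (List String)) : Prop := out = zoom_and_enhance_alt map path
instance (map : List String) (path : List (Int × Int)) (out : List (List String)) : Decidable (Spec_zoom_and_enhance map path out) := by unfold Spec_zoom_and_enhance; infer_instance

-- ===== CLAIM (what is proved, stated in full; the proofs are below) =====
def Claim_equal_zoom_and_enhance : Prop := ∀ (map : List String) (path : List (Int × Int)), Dom_zoom_and_enhance map path → Pre_zoom_and_enhance map path → Spec_zoom_and_enhance map path (zoom_and_enhance map path)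

-- ===== LEMMAS AND PROOFS =====

-- cell (R, C) of a grid, and the character both programs put there
def gcell (g : List (List String)) (R C : Nat) : String := (g.getD R []).getD C ""

def tplN (t : String × String × String) (pr : Nat) : String :=
  if pr = 0 then t.1 else if pr = 1 then t.2.1 else t.2.2

def cellTpl (map : List String) (path : List (Int × Int)) (r c : Nat) :
    String × String × String :=
  if ((c : Int), (r : Int)) ∈ path then
    (paintMap ((map.getD r "").toList.getD c '.')).getD ("...", "...", "...")
  else ("...", "...", "...")

def paintedB (map : List String) (path : List (Int × Int)) (r c : Nat) : Bool :=
  decide (((c : Int), (r : Int)) ∈ path) &&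
    (paintMap ((map.getD r "").toList.getD c '.')).isSome

def specCell (map : List String) (path : List (Int × Int)) (R C : Nat) : String :=
  String.singleton ((tplN (cellTpl map path (R / 3) (C / 3)) (R % 3)).toList.getD (C % 3) '.')

lemma getD_set_if {α : Type} (l : List α) (i : Nat) (a d : α) (hi : i < l.length) (j : Nat) :
    (l.set i a).getD j d = if j = i then a else l.getD j d := by
  by_cases h : j = i
  · subst h
    rw [List.getD_eq_getElem _ _ (by simpa using hi)]
    simp [List.getElem_set_self]
  · rw [List.getD_eq_getElem?_getD, List.getElem?_set_ne (fun he => h he.symm),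
      ← List.getD_eq_getElem?_getD]
    simp [h]

lemma gcell_aWrite (g : List (List String)) (R C : Int) (s : String) (hR0 : 0 ≤ R) (hC0 : 0 ≤ C)
    (hR : R.toNat < g.length) (hC : C.toNat < (g.getD R.toNat []).length) (R' C' : Nat) :
    gcell (aWrite g R C s) R' C' = if R' = R.toNat ∧ C' = C.toNat then s else gcell g R' C' := by
  unfold aWrite gcell
  rw [PySem.List.pySetD_of_nonneg _ _ hR0, PySem.List.pySetD_of_nonneg _ _ hC0,
    PySem.List.pyGetD_of_nonneg _ _ hR0]
  rw [getD_set_if _ _ _ _ hR]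
  by_cases hr : R' = R.toNat
  · subst hr
    rw [if_pos rfl, getD_set_if _ _ _ _ hC]
    by_cases hc : C' = C.toNat <;> simp [hc]
  · simp [hr]

lemma length_aWrite (g : List (List String)) (R C : Int) (s : String) :
    (aWrite g R C s).length = g.length := by
  simp [aWrite, PySem.List.length_pySetD]

lemma rowlen_aWrite (g : List (List String)) (R C : Int) (s : String) (W : Nat)
    (hR0 : 0 ≤ R) (hR : R.toNat < g.length) (h : ∀ ro ∈ g, ro.length = W) :
    ∀ ro ∈ aWrite g R C s, ro.length = W := by
  unfold aWrite
  rw [PySem.List.pySetD_of_nonneg _ _ hR0, PySem.List.pyGetD_of_nonneg _ _ hR0]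
  intro ro hro
  rcases List.mem_or_eq_of_mem_set hro with h1 | h1
  · exact h ro h1
  · subst h1
    rw [PySem.List.length_pySetD]
    exact h _ (List.getD_eq_getElem _ _ hR ▸ List.getElem_mem hR)

lemma getD_length (g : List (List String)) (i W : Nat)
    (hrow : ∀ ro ∈ g, ro.length = W) (hi : i < g.length) : (g.getD i []).length = W := by
  rw [List.getD_eq_getElem _ _ hi]
  exact hrow _ (List.getElem_mem hi)

lemma gcell_aWrite3 (g : List (List String)) (R C : Int) (s0 s1 s2 : String)
    (hR0 : 0 ≤ R) (hC0 : 0 ≤ C) (hR : R.toNat < g.length) (W : Nat)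
    (hrow : ∀ ro ∈ g, ro.length = W) (hC : C.toNat + 3 ≤ W) (R' C' : Nat) :
    gcell (aWrite (aWrite (aWrite g R C s0) R (C + 1) s1) R (C + 2) s2) R' C' =
      (if R' = R.toNat ∧ C.toNat ≤ C' ∧ C' < C.toNat + 3 then
        (if C' = C.toNat then s0 else if C' = C.toNat + 1 then s1 else s2)
      else gcell g R' C') := by
  have hrowg : (g.getD R.toNat []).length = W := getD_length g R.toNat W hrow hR
  have l1 := length_aWrite g R C s0
  have w1 := rowlen_aWrite g R C s0 W hR0 hR hrow
  have l2 := length_aWrite (aWrite g R C s0) R (C + 1) s1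
  have w2 := rowlen_aWrite (aWrite g R C s0) R (C + 1) s1 W hR0 (by omega) w1
  have hrow1 : ((aWrite g R C s0).getD R.toNat []).length = W :=
    getD_length _ R.toNat W w1 (by omega)
  have hrow2 : ((aWrite (aWrite g R C s0) R (C + 1) s1).getD R.toNat []).length = W :=
    getD_length _ R.toNat W w2 (by omega)
  rw [gcell_aWrite _ _ _ _ hR0 (by omega) (by omega) (by omega),
    gcell_aWrite _ _ _ _ hR0 (by omega) (by omega) (by omega),
    gcell_aWrite _ _ _ _ hR0 hC0 hR (by omega)]
  have e1 : (C + 1).toNat = C.toNat + 1 := by omega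
  have e2 : (C + 2).toNat = C.toNat + 2 := by omega
  rw [e1, e2]
  split_ifs <;> first | rfl | omega

lemma pyRange3 : PySem.List.pyRange 0 3 1 = [0, 1, 2] := by decide

lemma length_aWrite3 (g : List (List String)) (R C0 C1 C2 : Int) (s0 s1 s2 : String) :
    (aWrite (aWrite (aWrite g R C0 s0) R C1 s1) R C2 s2).length = g.length := by
  simp [length_aWrite]

lemma rowlen_aWrite3 (g : List (List String)) (R C0 C1 C2 : Int) (s0 s1 s2 : String) (W : Nat)
    (hR0 : 0 ≤ R) (hR : R.toNat < g.length) (h : ∀ ro ∈ g, ro.length = W) :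
    ∀ ro ∈ aWrite (aWrite (aWrite g R C0 s0) R C1 s1) R C2 s2, ro.length = W := by
  apply rowlen_aWrite _ _ _ _ _ hR0 (by simp [length_aWrite]; omega)
  apply rowlen_aWrite _ _ _ _ _ hR0 (by simp [length_aWrite]; omega)
  exact rowlen_aWrite _ _ _ _ _ hR0 hR h

lemma gcell_aPaint (g : List (List String)) (R C : Int) (t : String × String × String)
    (h1 : t.1.toList.length = 3) (h2 : t.2.1.toList.length = 3) (h3 : t.2.2.toList.length = 3)
    (hR0 : 0 ≤ R) (hC0 : 0 ≤ C) (hR : R.toNat + 3 ≤ g.length) (W : Nat)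
    (hrow : ∀ ro ∈ g, ro.length = W) (hC : C.toNat + 3 ≤ W) (R' C' : Nat) :
    gcell (aPaint g R C t) R' C' =
      (if R.toNat ≤ R' ∧ R' < R.toNat + 3 ∧ C.toNat ≤ C' ∧ C' < C.toNat + 3 then
        String.singleton ((tplN t (R' - R.toNat)).toList.getD (C' - C.toNat) '.')
      else gcell g R' C') := by
  obtain ⟨a0, a1, a2, ha⟩ := List.length_eq_three.mp h1
  obtain ⟨b0, b1, b2, hb⟩ := List.length_eq_three.mp h2
  obtain ⟨c0, c1, c2, hc⟩ := List.length_eq_three.mp h3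
  unfold aPaint
  rw [pyRange3]
  simp only [List.foldl_cons, List.foldl_nil, tplRow]
  norm_num
  rw [ha, hb, hc]
  simp only [PySem.List.enumerate_cons, PySem.List.enumerate_nil, List.foldl_cons, List.foldl_nil]
  norm_num
  have w1 := rowlen_aWrite3 g R C (C + 1) (C + 2)
    (String.singleton a0) (String.singleton a1) (String.singleton a2) W hR0 (by omega) hrow
  have w2 := rowlen_aWrite3 _ (R + 1) C (C + 1) (C + 2)
    (String.singleton b0) (String.singleton b1) (String.singleton b2) W (by omega)
    (by simp [length_aWrite3]; omega) w1
  rw [gcell_aWrite3 _ _ _ _ _ _ (by omega) hC0 (by simp [length_aWrite3]; omega) W w2 hC,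
    gcell_aWrite3 _ _ _ _ _ _ (by omega) hC0 (by simp [length_aWrite3]; omega) W w1 hC,
    gcell_aWrite3 _ _ _ _ _ _ hR0 hC0 (by omega) W hrow hC]
  have e1 : (R + 1).toNat = R.toNat + 1 := by omega
  have e2 : (R + 2).toNat = R.toNat + 2 := by omega
  rw [e1, e2]
  by_cases hin : R ≤ (R' : Int) ∧ R' < R.toNat + 3 ∧ C ≤ (C' : Int) ∧ C' < C.toNat + 3
  · rw [if_pos hin]
    rw [show R' = R.toNat + (R' - R.toNat) from by omega, show C' = C.toNat + (C' - C.toNat) from by omega]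
    have hpr : R' - R.toNat < 3 := by omega
    have hi : C' - C.toNat < 3 := by omega
    generalize R' - R.toNat = pr at hpr ⊢
    generalize C' - C.toNat = i at hi ⊢
    interval_cases pr <;> interval_cases i <;> simp [tplN, ha, hb, hc]
  · rw [if_neg hin]
    split_ifs <;> first | rfl | omega

lemma length_aPaint (g : List (List String)) (R C : Int) (t : String × String × String)
    (h1 : t.1.toList.length = 3) (h2 : t.2.1.toList.length = 3) (h3 : t.2.2.toList.length = 3) :
    (aPaint g R C t).length = g.length := by
  obtain ⟨a0, a1, a2, ha⟩ := List.length_eq_three.mp h1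
  obtain ⟨b0, b1, b2, hb⟩ := List.length_eq_three.mp h2
  obtain ⟨c0, c1, c2, hc⟩ := List.length_eq_three.mp h3
  unfold aPaint
  rw [pyRange3]
  simp only [List.foldl_cons, List.foldl_nil, tplRow]
  norm_num
  rw [ha, hb, hc]
  simp only [PySem.List.enumerate_cons, PySem.List.enumerate_nil, List.foldl_cons, List.foldl_nil]
  simp [length_aWrite]

lemma rowlen_aPaint (g : List (List String)) (R C : Int) (t : String × String × String)
    (h1 : t.1.toList.length = 3) (h2 : t.2.1.toList.length = 3) (h3 : t.2.2.toList.length = 3)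
    (W : Nat) (hR0 : 0 ≤ R) (hR : R.toNat + 3 ≤ g.length) (hrow : ∀ ro ∈ g, ro.length = W) :
    ∀ ro ∈ aPaint g R C t, ro.length = W := by
  obtain ⟨a0, a1, a2, ha⟩ := List.length_eq_three.mp h1
  obtain ⟨b0, b1, b2, hb⟩ := List.length_eq_three.mp h2
  obtain ⟨c0, c1, c2, hc⟩ := List.length_eq_three.mp h3
  unfold aPaint
  rw [pyRange3]
  simp only [List.foldl_cons, List.foldl_nil, tplRow]
  norm_num
  rw [ha, hb, hc]
  simp only [PySem.List.enumerate_cons, PySem.List.enumerate_nil, List.foldl_cons, List.foldl_nil]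
  norm_num
  have w1 := rowlen_aWrite3 g R C (C + 1) (C + 2)
    (String.singleton a0) (String.singleton a1) (String.singleton a2) W hR0 (by omega) hrow
  have w2 := rowlen_aWrite3 _ (R + 1) C (C + 1) (C + 2)
    (String.singleton b0) (String.singleton b1) (String.singleton b2) W (by omega)
    (by simp [length_aWrite3]; omega) w1
  exact rowlen_aWrite3 _ (R + 2) C (C + 1) (C + 2) _ _ _ W (by omega)
    (by simp [length_aWrite3]; omega) w2

lemma paintMap_dot : paintMap '.' = none := rfl

lemma paintMap_shape (v : Char) (t : String × String × String) (h : paintMap v = some t) :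
    t.1.toList.length = 3 ∧ t.2.1.toList.length = 3 ∧ t.2.2.toList.length = 3 := by
  unfold paintMap at h
  split at h <;> first
    | (cases h; exact ⟨by decide, by decide, by decide⟩)
    | cases h

lemma colfold (map : List String) (path : List (Int × Int))
    (hpre : Pre_zoom_and_enhance map path) (r : Nat) (hr : r < map.length) :
    ∀ (cols : List Char) (s : Nat) (g : List (List String)),
      (map.getD r "").toList.drop s = cols →
      g.length = 3 * map.length → (∀ ro ∈ g, ro.length = 3 * map.length) →
      ((PySem.List.enumerate cols (s : Int)).foldl (aCol path (r : Int)) g).length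
          = 3 * map.length ∧
      (∀ ro ∈ (PySem.List.enumerate cols (s : Int)).foldl (aCol path (r : Int)) g,
          ro.length = 3 * map.length) ∧
      ∀ R C : Nat,
        gcell ((PySem.List.enumerate cols (s : Int)).foldl (aCol path (r : Int)) g) R C =
          if R / 3 = r ∧ s ≤ C / 3 ∧ C / 3 < s + cols.length ∧
              paintedB map path r (C / 3) = true
          then specCell map path R C else gcell g R C := by
  intro cols
  induction cols with
  | nil =>
    intro s g hdrop hg hrows
    simp only [PySem.List.enumerate_nil, List.foldl_nil]
    refine ⟨hg, hrows, ?_⟩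
    intro R C
    rw [if_neg (by simp only [List.length_nil]; omega)]
  | cons ch rest ih =>
    intro s g hdrop hg hrows
    have hs_lt : s < (map.getD r "").toList.length := by
      by_contra hge
      rw [List.drop_eq_nil_of_le (by omega)] at hdrop
      simp at hdrop
    have hch : (map.getD r "").toList.getD s '.' = ch := by
      have h0 : ((map.getD r "").toList.drop s)[0]? = some ch := by rw [hdrop]; rfl
      rw [List.getElem?_drop] at h0
      rw [List.getD_eq_getElem?_getD]
      simp only [Nat.add_zero] at h0
      rw [h0]
      rfl
    have hrest : (map.getD r "").toList.drop (s + 1) = rest := by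
      rw [← List.tail_drop, hdrop]
      rfl
    rw [PySem.List.enumerate_cons, List.foldl_cons]
    have hcast : ((s : Int) + 1) = ((s + 1 : Nat) : Int) := by push_cast; ring
    rw [hcast]
    cases hpm : paintMap (if ((s : Int), (r : Int)) ∈ path then ch else '.') with
    | none =>
      have hstep : aCol path (r : Int) g ((s : Int), ch) = g := by
        simp only [aCol, hpm]
      rw [hstep]
      have hps : paintedB map path r s = false := by
        by_cases hmem : ((s : Int), (r : Int)) ∈ path
        · have hpm2 : paintMap ch = none := by rwa [if_pos hmem] at hpm
          unfold paintedB
          rw [hch, hpm2]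
          simp
        · unfold paintedB
          simp [hmem]
      obtain ⟨ihl, ihw, ihc⟩ := ih (s + 1) g hrest hg hrows
      refine ⟨ihl, ihw, ?_⟩
      intro R C
      rw [ihc R C]
      simp only [List.length_cons]
      split_ifs with h1 h2 h2
      · rfl
      · exact absurd ⟨h1.1, by omega, by omega, h1.2.2.2⟩ h2
      · by_cases hcs : C / 3 = s
        · rw [hcs] at h2
          rw [h2.2.2.2] at hps
          exact Bool.noConfusion hps
        · exact absurd ⟨h2.1, by omega, by omega, h2.2.2.2⟩ h1
      · rfl
    | some tpl =>
      have hmem : ((s : Int), (r : Int)) ∈ path := by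
        by_cases hmem : ((s : Int), (r : Int)) ∈ path
        · exact hmem
        · rw [if_neg hmem, paintMap_dot] at hpm
          simp at hpm
      rw [if_pos hmem] at hpm
      have hsn : s < map.length := hpre r hr s hs_lt hmem (by rw [hch, hpm]; rfl)
      obtain ⟨ht1, ht2, ht3⟩ := paintMap_shape ch tpl hpm
      have hstep : aCol path (r : Int) g ((s : Int), ch)
          = aPaint g ((r : Int) * 3) ((s : Int) * 3) tpl := by
        simp only [aCol, if_pos hmem, hpm]
      rw [hstep]
      have hlen' := length_aPaint g ((r : Int) * 3) ((s : Int) * 3) tpl ht1 ht2 ht3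
      have hrows' := rowlen_aPaint g ((r : Int) * 3) ((s : Int) * 3) tpl ht1 ht2 ht3
        (3 * map.length) (by positivity) (by omega) hrows
      obtain ⟨ihl, ihw, ihc⟩ := ih (s + 1) _ hrest (by omega) hrows'
      refine ⟨ihl, ihw, ?_⟩
      intro R C
      rw [ihc R C]
      have hgc := gcell_aPaint g ((r : Int) * 3) ((s : Int) * 3) tpl ht1 ht2 ht3
        (by positivity) (by positivity) (by omega) (3 * map.length) hrows (by omega) R C
      have hps : paintedB map path r s = true := by
        unfold paintedB
        rw [hch, hpm]
        simp [hmem]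
      have hct : cellTpl map path r s = tpl := by
        unfold cellTpl
        rw [if_pos hmem, hch, hpm]
        rfl
      simp only [List.length_cons]
      split_ifs with h1 h2 h2
      · rfl
      · exact absurd ⟨h1.1, by omega, by omega, h1.2.2.2⟩ h2
      · by_cases hcs : C / 3 = s
        · rw [hgc, if_pos (by omega)]
          unfold specCell
          rw [hcs, h2.1, hct,
            (by omega : R - ((r : Int) * 3).toNat = R % 3),
            (by omega : C - ((s : Int) * 3).toNat = C % 3)]
        · exact absurd ⟨h2.1, by omega, by omega, h2.2.2.2⟩ h1
      · rw [hgc, if_neg ?_]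
        intro hin
        exact h2 ⟨by omega, by omega, by omega, by rw [(by omega : C / 3 = s)]; exact hps⟩

lemma painted_lt (map : List String) (path : List (Int × Int)) (r c : Nat)
    (h : paintedB map path r c = true) : c < (map.getD r "").toList.length := by
  by_contra hge
  unfold paintedB at h
  rw [List.getD_eq_default _ _ (by omega), paintMap_dot] at h
  simp at h

lemma rowfold (map : List String) (path : List (Int × Int))
    (hpre : Pre_zoom_and_enhance map path) :
    ∀ (rows : List String) (s : Nat) (g : List (List String)),
      map.drop s = rows →
      g.length = 3 * map.length → (∀ ro ∈ g, ro.length = 3 * map.length) →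
      ((PySem.List.enumerate rows (s : Int)).foldl (aRow path) g).length = 3 * map.length ∧
      (∀ ro ∈ (PySem.List.enumerate rows (s : Int)).foldl (aRow path) g,
          ro.length = 3 * map.length) ∧
      ∀ R C : Nat,
        gcell ((PySem.List.enumerate rows (s : Int)).foldl (aRow path) g) R C =
          if s ≤ R / 3 ∧ R / 3 < s + rows.length ∧ paintedB map path (R / 3) (C / 3) = true
          then specCell map path R C else gcell g R C := by
  intro rows
  induction rows with
  | nil =>
    intro s g hdrop hg hrows
    simp only [PySem.List.enumerate_nil, List.foldl_nil]
    refine ⟨hg, hrows, ?_⟩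
    intro R C
    rw [if_neg (by simp only [List.length_nil]; omega)]
  | cons rowstr rest ih =>
    intro s g hdrop hg hrows
    have hs_lt : s < map.length := by
      by_contra hge
      rw [List.drop_eq_nil_of_le (by omega)] at hdrop
      simp at hdrop
    have hrow : map.getD s "" = rowstr := by
      have h0 : (map.drop s)[0]? = some rowstr := by rw [hdrop]; rfl
      rw [List.getElem?_drop] at h0
      rw [List.getD_eq_getElem?_getD]
      simp only [Nat.add_zero] at h0
      rw [h0]
      rfl
    have hrest : map.drop (s + 1) = rest := by
      rw [← List.tail_drop, hdrop]
      rfl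
    rw [PySem.List.enumerate_cons, List.foldl_cons]
    have hcast : ((s : Int) + 1) = ((s + 1 : Nat) : Int) := by push_cast; ring
    rw [hcast]
    have hstep : aRow path g ((s : Int), rowstr)
        = (PySem.List.enumerate rowstr.toList ((0 : Nat) : Int)).foldl (aCol path (s : Int)) g := by
      simp only [aRow, Nat.cast_zero]
    rw [hstep]
    obtain ⟨cl, cw, cc⟩ := colfold map path hpre s hs_lt rowstr.toList 0
      g (by rw [List.drop_zero, hrow]) hg hrows
    obtain ⟨ihl, ihw, ihc⟩ := ih (s + 1) _ hrest (by omega) cw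
    refine ⟨ihl, ihw, ?_⟩
    intro R C
    rw [ihc R C]
    simp only [List.length_cons]
    split_ifs with h1 h2 h2
    · rfl
    · exact absurd ⟨by omega, by omega, h1.2.2⟩ h2
    · by_cases hrs : R / 3 = s
      · rw [cc R C, if_pos ?_]
        refine ⟨hrs, by omega, ?_, ?_⟩
        · have := painted_lt map path (R / 3) (C / 3) h2.2.2
          rw [hrs, hrow] at this
          omega
        · rw [← hrs]
          exact h2.2.2
      · exact absurd ⟨by omega, by omega, h2.2.2⟩ h1
    · rw [cc R C, if_neg ?_]
      intro hin
      exact h2 ⟨by omega, by omega, by rw [(by omega : R / 3 = s)]; exact hin.2.2.2⟩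

lemma dots_getD (i : Nat) : (("..." : String).toList.getD i '.') = '.' := by
  have h : ("..." : String).toList = ['.', '.', '.'] := by decide
  rw [h]
  rcases i with _ | _ | _ | i <;> rfl

lemma tplN_dots (pr : Nat) : tplN ("...", "...", "...") pr = "..." := by
  unfold tplN
  split_ifs <;> rfl

lemma specCell_unpainted (map : List String) (path : List (Int × Int)) (R C : Nat)
    (h : paintedB map path (R / 3) (C / 3) = false) : specCell map path R C = "." := by
  unfold specCell cellTpl
  unfold paintedB at h
  by_cases hmem : (((C / 3 : Nat) : Int), ((R / 3 : Nat) : Int)) ∈ path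
  · simp only [hmem, decide_true, Bool.true_and] at h
    rw [Option.isSome_eq_false_iff, Option.isNone_iff_eq_none] at h
    rw [if_pos hmem, h]
    rw [Option.getD_none, tplN_dots, dots_getD]
    rfl
  · rw [if_neg hmem, tplN_dots, dots_getD]
    rfl

lemma A_cells (map : List String) (path : List (Int × Int))
    (hpre : Pre_zoom_and_enhance map path) :
    (zoom_and_enhance map path).length = 3 * map.length ∧
    (∀ ro ∈ zoom_and_enhance map path, ro.length = 3 * map.length) ∧
    ∀ R C : Nat, R < 3 * map.length → C < 3 * map.length →
      gcell (zoom_and_enhance map path) R C = specCell map path R C := by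
  have hg : (List.replicate (map.length * 3) (List.replicate (map.length * 3) ".")).length
      = 3 * map.length := by simp [Nat.mul_comm]
  have hrows : ∀ ro ∈ List.replicate (map.length * 3) (List.replicate (map.length * 3)
      ("." : String)), ro.length = 3 * map.length := by
    intro ro hro
    rw [List.eq_of_mem_replicate hro]
    simp [Nat.mul_comm]
  obtain ⟨al, aw, ac⟩ := rowfold map path hpre map 0 _ List.drop_zero hg hrows
  simp only [Nat.cast_zero] at al aw ac
  have hA : zoom_and_enhance map path = (PySem.List.enumerate map 0).foldl (aRow path)
      (List.replicate (map.length * 3) (List.replicate (map.length * 3) ".")) := rfl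
  refine ⟨hA ▸ al, hA ▸ aw, ?_⟩
  intro R C hR hC
  rw [hA, ac R C]
  have hinit : gcell (List.replicate (map.length * 3) (List.replicate (map.length * 3)
      ("." : String))) R C = "." := by
    have h1 : (List.replicate (map.length * 3) (List.replicate (map.length * 3)
        ("." : String))).getD R [] = List.replicate (map.length * 3) "." := by
      rw [List.getD_eq_getElem _ _ (by simp; omega), List.getElem_replicate]
    unfold gcell
    rw [h1, List.getD_eq_getElem _ _ (by simp; omega), List.getElem_replicate]
  by_cases hp : paintedB map path (R / 3) (C / 3) = true
  · rw [if_pos ⟨by omega, by omega, hp⟩]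
  · rw [if_neg (by intro h; exact hp h.2.2), hinit,
      specCell_unpainted map path R C (by simpa using hp)]

lemma foldl3 (l : List Nat) (f g h : Nat → List String) (a b c : List String) :
    l.foldl (fun (acc : List String × List String × List String) x =>
        (acc.1 ++ f x, acc.2.1 ++ g x, acc.2.2 ++ h x)) (a, b, c)
      = (a ++ l.flatMap f, b ++ l.flatMap g, c ++ l.flatMap h) := by
  induction l generalizing a b c with
  | nil => simp
  | cons x xs ih => simp [ih, List.flatMap_cons, List.append_assoc]

lemma cellTpl_shape (map : List String) (path : List (Int × Int)) (r c : Nat) :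
    (cellTpl map path r c).1.toList.length = 3 ∧
    (cellTpl map path r c).2.1.toList.length = 3 ∧
    (cellTpl map path r c).2.2.toList.length = 3 := by
  unfold cellTpl
  split_ifs with hmem
  · cases hpm : paintMap ((map.getD r "").toList.getD c '.') with
    | none => exact ⟨by decide, by decide, by decide⟩
    | some t => exact paintMap_shape _ t hpm
  · exact ⟨by decide, by decide, by decide⟩

-- B as a flatMap of row blocks
lemma B_flat (map : List String) (path : List (Int × Int)) :
    zoom_and_enhance_alt map path = (List.range map.length).flatMap (fun r =>
      [(List.range map.length).flatMap
          (fun c => (cellTpl map path r c).1.toList.map Char.toString),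
       (List.range map.length).flatMap
          (fun c => (cellTpl map path r c).2.1.toList.map Char.toString),
       (List.range map.length).flatMap
          (fun c => (cellTpl map path r c).2.2.toList.map Char.toString)]) := by
  unfold zoom_and_enhance_alt
  have hstep : (fun (out : List (List String)) row_idx =>
      let row := map.getD row_idx ""
      let tmb := (List.range map.length).foldl
        (fun (acc : List String × List String × List String) col_idx =>
          let v := row.toList.getD col_idx '.'
          let t := if ((col_idx : Int), (row_idx : Int)) ∈ path then
              (paintMap v).getD ("...", "...", "...") else ("...", "...", "...")
          (acc.1 ++ t.1.toList.map Char.toString,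
           acc.2.1 ++ t.2.1.toList.map Char.toString,
           acc.2.2 ++ t.2.2.toList.map Char.toString))
        ([], [], [])
      out ++ [tmb.1, tmb.2.1, tmb.2.2]) = (fun out row_idx => out ++
        [(List.range map.length).flatMap
            (fun c => (cellTpl map path row_idx c).1.toList.map Char.toString),
         (List.range map.length).flatMap
            (fun c => (cellTpl map path row_idx c).2.1.toList.map Char.toString),
         (List.range map.length).flatMap
            (fun c => (cellTpl map path row_idx c).2.2.toList.map Char.toString)]) := by
    funext out r
    show out ++ _ = _
    have hfun : (fun (acc : List String × List String × List String) col_idx =>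
        let v := (map.getD r "").toList.getD col_idx '.'
        let t := if ((col_idx : Int), (r : Int)) ∈ path then
            (paintMap v).getD ("...", "...", "...") else ("...", "...", "...")
        (acc.1 ++ t.1.toList.map Char.toString,
         acc.2.1 ++ t.2.1.toList.map Char.toString,
         acc.2.2 ++ t.2.2.toList.map Char.toString)) =
        (fun (acc : List String × List String × List String) col_idx =>
          (acc.1 ++ (cellTpl map path r col_idx).1.toList.map Char.toString,
           acc.2.1 ++ (cellTpl map path r col_idx).2.1.toList.map Char.toString,
           acc.2.2 ++ (cellTpl map path r col_idx).2.2.toList.map Char.toString)) := by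
      funext acc c
      simp only [cellTpl]
    rw [hfun, foldl3 (List.range map.length)
      (fun c => (cellTpl map path r c).1.toList.map Char.toString)
      (fun c => (cellTpl map path r c).2.1.toList.map Char.toString)
      (fun c => (cellTpl map path r c).2.2.toList.map Char.toString) [] [] []]
    simp
  show (List.range map.length).foldl _ [] = _
  rw [hstep, PySem.List.foldl_append_eq_flatMap]
  simp

lemma flat3_length {α : Type} (m : Nat) (F : Nat → List α) (hF : ∀ i, (F i).length = 3) :
    ((List.range m).flatMap F).length = 3 * m := by
  induction m with
  | zero => simp
  | succ k ih =>
    rw [List.range_succ, List.flatMap_append]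
    simp only [List.length_append, ih, List.flatMap_cons, List.flatMap_nil, List.append_nil,
      hF k]
    omega

lemma flat3_getD {α : Type} (m : Nat) (F : Nat → List α) (d : α)
    (hF : ∀ i, (F i).length = 3) (R : Nat) (hR : R < 3 * m) :
    ((List.range m).flatMap F).getD R d = (F (R / 3)).getD (R % 3) d := by
  induction m with
  | zero => omega
  | succ k ih =>
    rw [List.range_succ, List.flatMap_append]
    simp only [List.flatMap_cons, List.flatMap_nil, List.append_nil]
    by_cases hRk : R < 3 * k
    · rw [List.getD_eq_getElem?_getD, List.getElem?_append_left
        (by rw [flat3_length k F hF]; omega), ← List.getD_eq_getElem?_getD]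
      exact ih hRk
    · rw [List.getD_eq_getElem?_getD, List.getElem?_append_right
        (by rw [flat3_length k F hF]; omega), flat3_length k F hF,
        ← List.getD_eq_getElem?_getD]
      rw [(by omega : R - 3 * k = R % 3), (by omega : R / 3 = k)]

lemma B_cells (map : List String) (path : List (Int × Int)) :
    (zoom_and_enhance_alt map path).length = 3 * map.length ∧
    (∀ ro ∈ zoom_and_enhance_alt map path, ro.length = 3 * map.length) ∧
    ∀ R C : Nat, R < 3 * map.length → C < 3 * map.length →
      gcell (zoom_and_enhance_alt map path) R C = specCell map path R C := by
  have hT : ∀ pick : (String × String × String) → String,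
      (∀ r c : Nat, (pick (cellTpl map path r c)).toList.length = 3) →
      ∀ r : Nat, ((List.range map.length).flatMap
        (fun c => (pick (cellTpl map path r c)).toList.map Char.toString)).length
          = 3 * map.length := by
    intro pick hp r
    exact flat3_length _ _ (fun c => by simp [hp r c])
  have hp1 : ∀ r c : Nat, ((cellTpl map path r c).1).toList.length = 3 :=
    fun r c => (cellTpl_shape map path r c).1
  have hp2 : ∀ r c : Nat, ((cellTpl map path r c).2.1).toList.length = 3 :=
    fun r c => (cellTpl_shape map path r c).2.1
  have hp3 : ∀ r c : Nat, ((cellTpl map path r c).2.2).toList.length = 3 :=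
    fun r c => (cellTpl_shape map path r c).2.2
  rw [B_flat]
  refine ⟨flat3_length _ _ (fun r => rfl), ?_, ?_⟩
  · intro ro hro
    rw [List.mem_flatMap] at hro
    obtain ⟨r, _, hro⟩ := hro
    simp only [List.mem_cons, List.not_mem_nil, or_false] at hro
    rcases hro with h | h | h <;> rw [h]
    · exact hT (·.1) hp1 r
    · exact hT (·.2.1) hp2 r
    · exact hT (·.2.2) hp3 r
  · intro R C hR hC
    unfold gcell
    rw [flat3_getD _ _ _ (fun r => rfl) R hR]
    have hgen : ∀ pick : (String × String × String) → String,
        (∀ r c : Nat, (pick (cellTpl map path r c)).toList.length = 3) →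
        ((List.range map.length).flatMap
          (fun c => (pick (cellTpl map path (R / 3) c)).toList.map Char.toString)).getD C ""
            = String.singleton ((pick (cellTpl map path (R / 3) (C / 3))).toList.getD
                (C % 3) '.') := by
      intro pick hp
      rw [flat3_getD _ _ _ (fun c => by simp [hp (R / 3) c]) C hC]
      rw [List.getD_eq_getElem _ _ (by simp [hp (R / 3) (C / 3)]; omega),
        List.getElem_map, List.getD_eq_getElem _ _ (by rw [hp (R / 3) (C / 3)]; omega)]
      rfl
    have hk : R % 3 = 0 ∨ R % 3 = 1 ∨ R % 3 = 2 := by omega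
    unfold specCell
    rcases hk with h | h | h <;> rw [h] <;> simp only [List.getD] <;> unfold tplN <;> norm_num
    · exact hgen (·.1) hp1
    · exact hgen (·.2.1) hp2
    · exact hgen (·.2.2) hp3

lemma grid_ext (g1 g2 : List (List String)) (L W : Nat) (h1 : g1.length = L)
    (h2 : g2.length = L) (w1 : ∀ ro ∈ g1, ro.length = W) (w2 : ∀ ro ∈ g2, ro.length = W)
    (hc : ∀ R C : Nat, R < L → C < W → gcell g1 R C = gcell g2 R C) : g1 = g2 := by
  apply List.ext_getElem (by omega)
  intro R hR1 hR2
  have hw1 : g1[R].length = W := w1 _ (List.getElem_mem hR1)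
  have hw2 : g2[R].length = W := w2 _ (List.getElem_mem hR2)
  apply List.ext_getElem (by omega)
  intro C hC1 hC2
  have hcell := hc R C (by omega) (by omega)
  unfold gcell at hcell
  rw [List.getD_eq_getElem _ _ hR1, List.getD_eq_getElem _ _ hR2] at hcell
  rw [List.getD_eq_getElem _ _ hC1, List.getD_eq_getElem _ _ hC2] at hcell
  exact hcell

lemma zoomA_eq_alt (map : List String) (path : List (Int × Int))
    (hpre : Pre_zoom_and_enhance map path) :
    zoom_and_enhance map path = zoom_and_enhance_alt map path := by
  obtain ⟨al, aw, ac⟩ := A_cells map path hpre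
  obtain ⟨bl, bw, bc⟩ := B_cells map path
  exact grid_ext _ _ (3 * map.length) (3 * map.length) al bl aw bw
    (fun R C hR hC => by rw [ac R C hR hC, bc R C hR hC])

-- ===== VERDICT (by name: the statement is the Claim_ definition above) =====
theorem zoom_and_enhance_spec : Claim_equal_zoom_and_enhance := by
  intro map path _ hpre
  unfold Spec_zoom_and_enhance
  exact zoomA_eq_alt map path hpre
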